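-- pv_equiv track=rewrite | github.com/zeyygt/automated-sustainability-report-generation-with-carbon-footprint-estimation-using-RAG | rag_retrieval/parsing.py | _trim_empty_columns
-- ===== SOURCE A (Python) =====
-- def _trim_empty_columns(segment: list[tuple[int, list[str]]]) -> list[tuple[int, list[str]]]:
--     if not segment:
--         return []
--     min_col, max_col = _segment_column_bounds(segment)
--     return [
--         (row_index, row_values[min_col : max_col + 1])
--         for row_index, row_values in segment
--     ]
--
-- def _segment_column_bounds(segment: list[tuple[int, list[str]]]) -> tuple[int, int]:
--     non_empty_cols = [
--         index
--         for _, row_values in segment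
--         for index, value in enumerate(row_values)
--         if value.strip()
--     ]
--     if not non_empty_cols:
--         return 0, 0
--     return min(non_empty_cols), max(non_empty_cols)
-- ===== SOURCE B (Python) =====
-- def _trim_empty_columns(segment: list[tuple[int, list[str]]]) -> list[tuple[int, list[str]]]:
--     if not segment:
--         return []
--     width = max(len(row) for _, row in segment)
--
--     def column_has_text(col):
--         return any(col < len(row) and row[col].strip() for _, row in segment)
--
--     lo = 0
--     while lo < width and not column_has_text(lo):
--         lo += 1
--     if lo == width:  # every cell is blank: keep column 0 only, like the (0, 0) bounds
--         lo = hi = 0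
--     else:
--         hi = width - 1
--         while not column_has_text(hi):
--             hi -= 1
--     return [(row_index, row_values[lo:hi + 1]) for row_index, row_values in segment]
-- ===== Notes on version B (the rewrite author's own statement) =====
-- stated objective: alternative
-- what changed: Replaces A's gather-all-nonempty-column-indices-then-min/max pass with a column-major search: scan columns from the left (and from the right) with short-circuiting 'any' over rows to locate the first/last column containing text, then slice rows once.
import Mathlib
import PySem

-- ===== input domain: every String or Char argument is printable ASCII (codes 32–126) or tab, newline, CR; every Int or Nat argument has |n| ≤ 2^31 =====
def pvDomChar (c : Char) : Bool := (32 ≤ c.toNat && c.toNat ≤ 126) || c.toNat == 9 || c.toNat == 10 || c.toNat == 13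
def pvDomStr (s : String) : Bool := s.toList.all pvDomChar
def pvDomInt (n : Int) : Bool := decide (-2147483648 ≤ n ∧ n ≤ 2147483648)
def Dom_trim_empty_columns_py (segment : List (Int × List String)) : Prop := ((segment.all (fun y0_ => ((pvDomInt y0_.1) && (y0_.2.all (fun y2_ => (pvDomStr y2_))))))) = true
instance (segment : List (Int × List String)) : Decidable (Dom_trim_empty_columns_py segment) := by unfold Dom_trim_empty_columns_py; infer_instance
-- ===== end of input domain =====

-- B replaces A's flat gather-all-nonempty-indices-then-min/max pass with a short-circuiting
-- column-major scan from each side for the first/last column containing text (alternative decomposition).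

-- ===== PORT A =====
-- helper _segment_column_bounds: the flat list of non-empty column indices, then min/max
def pvNonEmptyCols (segment : List (Int × List String)) : List Int :=
  segment.flatMap (fun p =>
    (PySem.List.enumerate p.2).filterMap (fun iv =>
      if PySem.Str.strip iv.2 ≠ "" then some iv.1 else none))

def segment_column_bounds_py (segment : List (Int × List String)) : Int × Int :=
  let nonEmptyCols := pvNonEmptyCols segment
  if nonEmptyCols = [] then (0, 0)
  else ((PySem.List.min? nonEmptyCols (fun x => x)).getD 0,
        (PySem.List.max? nonEmptyCols (fun x => x)).getD 0)

def trim_empty_columns_py (segment : List (Int × List String)) : List (Int × List String) :=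
  if segment = [] then []
  else
    let b := segment_column_bounds_py segment
    segment.map (fun p => (p.1, PySem.List.slice p.2 (some b.1) (some (b.2 + 1))))

-- ===== PORT B =====
-- any(col < len(row) and row[col].strip() for _, row in segment)
def pvColHasText (segment : List (Int × List String)) (col : Nat) : Bool :=
  segment.any (fun p => decide (col < p.2.length) && decide (PySem.Str.strip (p.2.getD col "") ≠ ""))

-- while lo < width and not column_has_text(lo): lo += 1
def pvScanLo (segment : List (Int × List String)) (width : Nat) (c : Nat) : Nat :=
  if c < width then
    (if pvColHasText segment c then c else pvScanLo segment width (c + 1))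
  else c
termination_by width - c

-- while not column_has_text(hi): hi -= 1   (the 0 case is a totality guard; B only
-- calls this when some column ≤ c has text, so the Python loop never goes negative)
def pvScanHi (segment : List (Int × List String)) (c : Nat) : Nat :=
  if pvColHasText segment c then c
  else match c with
    | 0 => 0
    | c' + 1 => pvScanHi segment c'

def trim_empty_columns_py_alt (segment : List (Int × List String)) : List (Int × List String) :=
  if segment = [] then []
  else
    let width := segment.foldl (fun acc p => max acc p.2.length) 0
    let lo := pvScanLo segment width 0
    let b : Nat × Nat := if lo = width then (0, 0) else (lo, pvScanHi segment (width - 1))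
    segment.map (fun p => (p.1, PySem.List.slice p.2 (some (b.1 : Int)) (some ((b.2 : Int) + 1))))

-- ===== PRECONDITION & SPEC =====
def Spec_trim_empty_columns_py (segment : List (Int × List String)) (out : List (Int × List String)) : Prop := out = trim_empty_columns_py_alt segment
instance (segment : List (Int × List String)) (out : List (Int × List String)) : Decidable (Spec_trim_empty_columns_py segment out) := by unfold Spec_trim_empty_columns_py; infer_instance

-- ===== CLAIM (what is proved, stated in full; the proofs are below) =====
def Claim_equal_trim_empty_columns_py : Prop := ∀ (segment : List (Int × List String)), Dom_trim_empty_columns_py segment → Spec_trim_empty_columns_py segment (trim_empty_columns_py segment)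

-- ===== LEMMAS AND PROOFS =====

-- membership in A's flat index list ↔ B's column predicate
lemma mem_pvNonEmptyCols (segment : List (Int × List String)) (x : Int) :
    x ∈ pvNonEmptyCols segment ↔ ∃ c : Nat, x = (c : Int) ∧ pvColHasText segment c = true := by
  unfold pvNonEmptyCols pvColHasText
  simp only [List.mem_flatMap, List.mem_filterMap, PySem.List.mem_enumerate_iff,
    List.any_eq_true, Bool.and_eq_true, decide_eq_true_eq]
  constructor
  · rintro ⟨p, hp, iv, ⟨k, hk, rfl⟩, hif⟩
    by_cases hs : PySem.Str.strip p.2[k] ≠ ""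
    · rw [if_pos hs] at hif
      refine ⟨k, by simpa using hif.symm, p, hp, hk, ?_⟩
      rwa [List.getD_eq_getElem?_getD, List.getElem?_eq_getElem hk]
    · rw [if_neg hs] at hif; cases hif
  · rintro ⟨c, rfl, p, hp, hc, hs⟩
    refine ⟨p, hp, ((0 : Int) + (c : Int), p.2[c]), ⟨c, hc, rfl⟩, ?_⟩
    simp only [List.getD_eq_getElem?_getD, List.getElem?_eq_getElem hc, Option.getD_some] at hs
    simp [hs]

lemma pv_foldl_max_len (l : List (Int × List String)) :
    ∀ a : Nat, a ≤ l.foldl (fun acc p => max acc p.2.length) a ∧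
      ∀ p ∈ l, p.2.length ≤ l.foldl (fun acc p => max acc p.2.length) a := by
  induction l with
  | nil => intro a; simp
  | cons q t ih =>
    intro a
    refine ⟨le_trans (le_max_left a q.2.length) (ih (max a q.2.length)).1, ?_⟩
    intro p hp
    rcases List.mem_cons.mp hp with h | h
    · subst h
      exact le_trans (le_max_right a p.2.length) (ih (max a p.2.length)).1
    · exact (ih (max a q.2.length)).2 p h

lemma pvColHasText_lt_width (segment : List (Int × List String)) (c : Nat)
    (h : pvColHasText segment c = true) :
    c < segment.foldl (fun acc p => max acc p.2.length) 0 := by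
  unfold pvColHasText at h
  simp only [List.any_eq_true, Bool.and_eq_true, decide_eq_true_eq] at h
  obtain ⟨p, hp, hlt, -⟩ := h
  exact lt_of_lt_of_le hlt ((pv_foldl_max_len segment 0).2 p hp)

lemma pvScanLo_none (segment : List (Int × List String)) (width : Nat) :
    ∀ n c, width - c ≤ n → c ≤ width →
      (∀ j, c ≤ j → j < width → pvColHasText segment j = false) →
      pvScanLo segment width c = width := by
  intro n
  induction n with
  | zero =>
    intro c h1 h2 _
    have hc : c = width := by omega
    subst hc
    rw [pvScanLo]; simp
  | succ n ih =>
    intro c h1 h2 h3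
    rw [pvScanLo]
    by_cases hc : c < width
    · rw [if_pos hc, h3 c le_rfl hc]
      simp only [Bool.false_eq_true, if_false]
      exact ih (c + 1) (by omega) (by omega) (fun j hj hjw => h3 j (by omega) hjw)
    · rw [if_neg hc]; omega

lemma pvScanLo_least (segment : List (Int × List String)) (width k : Nat)
    (hkw : k < width) (hk : pvColHasText segment k = true) :
    ∀ n c, k - c ≤ n → c ≤ k →
      (∀ j, c ≤ j → j < k → pvColHasText segment j = false) →
      pvScanLo segment width c = k := by
  intro n
  induction n with
  | zero =>
    intro c h1 h2 _
    have hc : c = k := by omega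
    subst hc
    rw [pvScanLo, if_pos hkw, if_pos hk]
  | succ n ih =>
    intro c h1 h2 h3
    by_cases hck : c = k
    · subst hck
      rw [pvScanLo, if_pos hkw, if_pos hk]
    · have hlt : c < k := by omega
      rw [pvScanLo, if_pos (by omega : c < width), h3 c le_rfl hlt]
      simp only [Bool.false_eq_true, if_false]
      exact ih (c + 1) (by omega) (by omega) (fun j hj hjk => h3 j (by omega) hjk)

lemma pvScanHi_greatest (segment : List (Int × List String)) (k : Nat)
    (hk : pvColHasText segment k = true) :
    ∀ c, k ≤ c → (∀ j, k < j → j ≤ c → pvColHasText segment j = false) →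
      pvScanHi segment c = k := by
  intro c
  induction c with
  | zero =>
    intro h1 _
    have : k = 0 := by omega
    subst this
    rw [pvScanHi, if_pos hk]
  | succ c ih =>
    intro h1 h2
    by_cases hkc : k = c + 1
    · subst hkc
      rw [pvScanHi, if_pos hk]
    · have hfalse : pvColHasText segment (c + 1) = false := h2 (c + 1) (by omega) le_rfl
      rw [pvScanHi, hfalse]
      simp only [Bool.false_eq_true, if_false]
      exact ih (by omega) (fun j hj hjc => h2 j hj (by omega))

-- ===== VERDICT (by name: the statement is the Claim_ definition above) =====
theorem trim_empty_columns_py_spec : Claim_equal_trim_empty_columns_py := by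
  intro segment _
  unfold Spec_trim_empty_columns_py trim_empty_columns_py trim_empty_columns_py_alt
    segment_column_bounds_py
  by_cases hseg : segment = []
  · simp [hseg]
  · simp only [if_neg hseg]
    by_cases hcols : pvNonEmptyCols segment = []
    · have hnohit : ∀ c, pvColHasText segment c = false := by
        intro c
        cases hcb : pvColHasText segment c with
        | false => rfl
        | true =>
          have hm : (c : Int) ∈ pvNonEmptyCols segment :=
            (mem_pvNonEmptyCols segment _).2 ⟨c, rfl, hcb⟩
          rw [hcols] at hm
          cases hm
      have hlo : pvScanLo segment (segment.foldl (fun acc p => max acc p.2.length) 0) 0 =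
          segment.foldl (fun acc p => max acc p.2.length) 0 :=
        pvScanLo_none segment _ _ 0 le_rfl (Nat.zero_le _) (fun j _ hj => hnohit j)
      simp [hcols, hlo]
    · cases hmin : PySem.List.min? (pvNonEmptyCols segment) (fun x => x) with
      | none => rw [PySem.List.min?_eq_none_iff] at hmin; exact absurd hmin hcols
      | some m =>
      cases hmax : PySem.List.max? (pvNonEmptyCols segment) (fun x => x) with
      | none => rw [PySem.List.max?_eq_none_iff] at hmax; exact absurd hmax hcols
      | some M =>
      obtain ⟨m', hm'eq, hhitm⟩ := (mem_pvNonEmptyCols segment m).1 (PySem.List.min?_mem hmin)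
      obtain ⟨M', hM'eq, hhitM⟩ := (mem_pvNonEmptyCols segment M).1 (PySem.List.max?_mem hmax)
      subst hm'eq; subst hM'eq
      have hminle : ∀ j : Nat, pvColHasText segment j = true → m' ≤ j := by
        intro j hj
        have : ((m' : Int)) ≤ (j : Int) :=
          PySem.List.min?_isMin hmin _ ((mem_pvNonEmptyCols segment _).2 ⟨j, rfl, hj⟩)
        exact_mod_cast this
      have hmaxge : ∀ j : Nat, pvColHasText segment j = true → j ≤ M' := by
        intro j hj
        have : ((j : Int)) ≤ (M' : Int) :=
          PySem.List.max?_isMax hmax _ ((mem_pvNonEmptyCols segment _).2 ⟨j, rfl, hj⟩)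
        exact_mod_cast this
      have hm'w : m' < segment.foldl (fun acc p => max acc p.2.length) 0 :=
        pvColHasText_lt_width segment m' hhitm
      have hM'w : M' < segment.foldl (fun acc p => max acc p.2.length) 0 :=
        pvColHasText_lt_width segment M' hhitM
      have hlo : pvScanLo segment (segment.foldl (fun acc p => max acc p.2.length) 0) 0 = m' :=
        pvScanLo_least segment _ m' hm'w hhitm m' 0 le_rfl (Nat.zero_le _)
          (fun j _ hj => by
            cases hcb : pvColHasText segment j with
            | false => rfl
            | true => exact absurd (hminle j hcb) (by omega))
      have hhi : pvScanHi segment (segment.foldl (fun acc p => max acc p.2.length) 0 - 1) = M' :=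
        pvScanHi_greatest segment M' hhitM _ (by omega)
          (fun j hj hjc => by
            cases hcb : pvColHasText segment j with
            | false => rfl
            | true => exact absurd (hmaxge j hcb) (by omega))
      have hne : m' ≠ segment.foldl (fun acc p => max acc p.2.length) 0 := by omega
      simp [hcols, hlo, hhi, hne]
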